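/-
  THE LANGUAGE jsmn ACCEPTS, PART 4c: THE TOKEN MODE OF THE STRICT BUILD — THE MAIN LOOP AND THE THEOREMS
  (the machine `strictRun` / `strictResult`: Json/Jsmn/AcceptLangStrict.lean; the lemmas about the token array: AcceptLangStrictSim.lean)

      token_mode_strict          jsmn_init; jsmn_parse = strictResult (lex true .top js)          (text < 2^31 bytes, room for the tokens)
      token_mode_strict_accepts  accepted  ⟺  the strict lexer reaches the end of the text ∧ the machine runs through ∧ no token is left open
-/
import Json.Jsmn.AcceptLangStrictSim
import Json.Jsmn.AcceptLangTokMain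
set_option linter.unusedSimpArgs false

namespace Jsmn.AcceptLang
open Jsmn

/-- A byte that may start a primitive in strict mode is printable. -/
theorem primStart_printable {c : UInt8} (h : primStart c = true) : notPrintable c = false := by
  by_cases hp : notPrintable c = true
  · simp only [primStart, notPrintable] at h hp
    simp at h hp
    rcases h with (((h | h) | h) | h) | h
    · subst h; simp at hp
    · omega
    · subst h; simp at hp
    · subst h; simp at hp
    · subst h; simp at hp
  · simpa using hp

theorem strictFrom_push (ns : List Node) (sup : Int) (i : Item) (r : List Item × Ending) :
    strictFrom ns sup (push i r) =
      match strictStep ns sup i with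
      | none => JSMN_ERROR_INVAL
      | some (ns', sup') => strictFrom ns' sup' r := by
  simp only [strictFrom, push, strictRun]
  cases strictStep ns sup i with
  | none => rfl
  | some x => rfl

theorem strictFrom_inval (ns : List Node) (sup : Int) : strictFrom ns sup ([], .inval) = JSMN_ERROR_INVAL := rfl
theorem strictFrom_part (ns : List Node) (sup : Int) : strictFrom ns sup ([], .part) = JSMN_ERROR_PART := rfl


/-- The main loop of the strict build in token mode, from any position: what the machine says about the rest of the text. -/
theorem loop_strict (js : List UInt8) (n : Nat) (hL : js.length < 2147483648) : ∀ fuel pos tn sup ts ns,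
    pos ≤ js.length → js.length - pos < fuel → ts.length = n → tn ≤ pos →
    Room tn (lex true .top (js.drop pos)).1 n → Rel ts tn sup ns →
    view (loop .strictLinks js n fuel ⟨⟨pos, tn, sup⟩, some ts, (tn : Int)⟩) =
      some (strictFrom ns sup (lex true .top (js.drop pos)), true) := by
  intro fuel
  induction fuel with
  | zero => intro pos _ _ _ _ _ h; omega
  | succ fuel ih =>
    intro pos tn sup ts ns hp hf hlen hle hroom hrel
    have hnl := hrel.len
    cases hd : js.drop pos with
    | nil =>
      rw [loop]
      simp [view, more_of_drop_nil hd, finish_strict pos tn hrel (by omega), lex, strictFrom, strictRun, hnl]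
    | cons c t =>
      obtain ⟨hlt, hc, ht, hm⟩ := of_drop_cons hd
      rw [hd] at hroom
      have hpos31 : pos + 1 < 2147483648 := by omega
      have htn31 : tn + 1 < 2147483648 := by omega
      have htn31' : tn < 2147483648 := by omega
      have hpos32 : pos + 1 < 4294967296 := by omega
      have hu : u32 ((pos : Int) + 1) = pos + 1 := u32_succ hpos32
      have hi : i32 ((tn : Int) + 1) = ((tn + 1 : Nat) : Int) := by unfold i32; omega
      by_cases h0 : c = 0
      · rw [loop]
        simp [view, hm, h0, finish_strict pos tn hrel (by omega), lex, strictFrom, strictRun, hnl]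
      have hm' : more js pos = true := by simp [hm, h0]
      rw [loop_succ _ _ _ _ _ hm']
      simp only [hc]
      have next1 : ∀ tn' sup' ts' ns', ts'.length = n → tn' ≤ pos + 1 → Room tn' (lex true .top t).1 n → Rel ts' tn' sup' ns' →
          view (loop .strictLinks js n fuel ⟨⟨pos + 1, tn', sup'⟩, some ts', (tn' : Int)⟩) =
            some (strictFrom ns' sup' (lex true .top t), true) := by
        intro tn' sup' ts' ns' h1 h2 h3 h4
        have := ih (pos + 1) tn' sup' ts' ns' hlt (fuel_step hf (Nat.le_refl pos) hlt) h1 h2 (by rwa [ht]) h4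
        rwa [ht] at this
      -- an opening bracket of kind `k`
      have hopen : ∀ k : Kind, (c = 0x7b ∧ k = .obj ∨ c = 0x5b ∧ k = .arr) →
          lex true .top (c :: t) = push k.openItem (lex true .top t) →
          body .strictLinks js (fuel + 1) n ⟨⟨pos, tn, sup⟩, some ts, (tn : Int)⟩ c =
            some (openBracket .strictLinks c n ⟨⟨pos, tn, sup⟩, some ts, (tn : Int)⟩) →
          view (stepOn .strictLinks js n fuel (body .strictLinks js (fuel + 1) n ⟨⟨pos, tn, sup⟩, some ts, (tn : Int)⟩ c)) =
            some (strictFrom ns sup (lex true .top (c :: t)), true) := by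
        intro k hk hlex hbody
        rw [hlex] at hroom
        obtain ⟨hr1, hroom'⟩ := Room.tok (by cases k <;> rfl) hroom
        have hob := openBracket_strict (pos := pos) (tn : Int) k c hk hrel hlen hr1 htn31 (Nat.lt_of_succ_lt hpos31)
        rw [hbody, hlex, strictFrom_push]
        cases hstep : strictStep ns sup k.openItem with
        | none =>
          simp only [hstep] at hob
          obtain ⟨s', hob', hsome⟩ := hob
          rw [hob']
          simp [stepOn, view, hsome]
        | some x =>
          obtain ⟨ns', sup'⟩ := x
          simp only [hstep] at hob
          obtain ⟨ts', hob', hl', hrel'⟩ := hob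
          rw [hob']
          simp only [stepOn, hu, hi]
          exact next1 (tn + 1) sup' ts' ns' hl' (Nat.succ_le_succ hle) hroom' hrel'
      -- a closing bracket of kind `k`
      have hclose : ∀ k : Kind, (c = 0x7d ∧ k = .obj ∨ c = 0x5d ∧ k = .arr) →
          lex true .top (c :: t) = push k.closeItem (lex true .top t) →
          body .strictLinks js (fuel + 1) n ⟨⟨pos, tn, sup⟩, some ts, (tn : Int)⟩ c =
            closeBracket .strictLinks c ⟨⟨pos, tn, sup⟩, some ts, (tn : Int)⟩ →
          view (stepOn .strictLinks js n fuel (body .strictLinks js (fuel + 1) n ⟨⟨pos, tn, sup⟩, some ts, (tn : Int)⟩ c)) =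
            some (strictFrom ns sup (lex true .top (c :: t)), true) := by
        intro k hk hlex hbody
        rw [hlex] at hroom
        have hroom' := Room.non (by cases k <;> rfl) hroom
        have hcb := closeBracket_strict pos (tn : Int) k c hk hrel hpos31
        rw [hbody, hlex, strictFrom_push]
        cases hstep : strictStep ns sup k.closeItem with
        | none =>
          simp only [hstep] at hcb
          rw [hcb]; rfl
        | some x =>
          obtain ⟨ns', sup'⟩ := x
          simp only [hstep] at hcb
          obtain ⟨ts', hcb', hl', hrel'⟩ := hcb
          rw [hcb']
          simp only [stepOn, hu]
          exact next1 tn sup' ts' ns' (by rw [hl', hlen]) (Nat.le_succ_of_le hle) hroom' hrel'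
      by_cases h1 : c = 0x7b
      · subst h1
        exact hopen .obj (Or.inl ⟨rfl, rfl⟩) (by simp [lex, Kind.openItem]) (by simp [body])
      by_cases h2 : c = 0x5b
      · subst h2
        exact hopen .arr (Or.inr ⟨rfl, rfl⟩) (by simp [lex, Kind.openItem]) (by simp [body])
      by_cases h3 : c = 0x7d
      · subst h3
        exact hclose .obj (Or.inl ⟨rfl, rfl⟩) (by simp [lex, Kind.closeItem]) (by simp [body])
      by_cases h4 : c = 0x5d
      · subst h4
        exact hclose .arr (Or.inr ⟨rfl, rfl⟩) (by simp [lex, Kind.closeItem]) (by simp [body])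
      have hst : Config.strictLinks.strict = true := rfl
      -- a string or primitive token has been made: go on behind it, at `q + 1`
      have goOn : ∀ (q : Nat) (type : Nat) (a b : Int), pos ≤ q → q < js.length → b ≠ -1 → tn < n →
          Room (tn + 1) (lex true .top (js.drop (q + 1))).1 n →
          view (stepOn .strictLinks js n fuel (some (.next ⟨⟨q, tn + 1, sup⟩,
            bumpSuper ⟨q, tn + 1, sup⟩ (some (fillAtS ts tn type a b sup)), ((tn + 1 : Nat) : Int)⟩))) =
          some (strictFrom (countInto ns sup ++ [⟨type, false, sup, false⟩]) sup (lex true .top (js.drop (q + 1))), true) := by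
        intro q type a b hq1 hq2 hb hr1 hr2
        obtain ⟨ts', hbs, hl', hrel'⟩ := rel_after_fill hrel q type a b (by rw [hlen]; exact hr1) hb htn31
        rw [hbs]
        have hu' : u32 ((q : Int) + 1) = q + 1 := u32_succ (lt32_of_lt hq2 hL)
        simp only [stepOn, hu']
        exact ih (q + 1) (tn + 1) sup ts' _ hq2 (fuel_step hf hq1 hq2) (by rw [hl', hlen]) (Nat.succ_le_succ (Nat.le_trans hle hq1)) hr2 hrel'
      by_cases h5 : c = 0x22
      · subst h5
        obtain ⟨r, hr, hrel'⟩ := strScan_sim true js hL (fuel + 1) (pos + 1) hlt (fuel_keep hf)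
        have hlex : lex true .top (0x22 :: t) = push .str (lex true (.str 0) (js.drop (pos + 1))) := by simp [lex, ht]
        rw [hlex] at hroom
        obtain ⟨hr1, hroom'⟩ := Room.tok rfl hroom
        have hstep : strictStep ns sup .str = some (countInto ns sup ++ [⟨JSMN_STRING, false, sup, false⟩], sup) := rfl
        rw [hlex, strictFrom_push, hstep]
        have hb0 : body .strictLinks js (fuel + 1) n ⟨⟨pos, tn, sup⟩, some ts, (tn : Int)⟩ 0x22 =
            (match parseString .strictLinks js (fuel + 1) ⟨pos, tn, sup⟩ (some ts) n with
              | none => none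
              | some (r, p, toks) =>
                if r < 0 then some (.ret r ⟨p, toks, (tn : Int)⟩) else some (.next ⟨p, bumpSuper p toks, i32 ((tn : Int) + 1)⟩)) := by
          simp [body]; rfl
        rw [hb0]
        cases r with
        | bad =>
          simp only [StrRel] at hrel'
          simp only [hrel', strictFrom_inval]
          simp [parseString, hu, hr, stepOn, view, JSMN_ERROR_INVAL]
        | eoi =>
          simp only [StrRel] at hrel'
          simp only [hrel', strictFrom_part]
          simp [parseString, hu, hr, stepOn, view, JSMN_ERROR_PART]
        | quote q =>
          simp only [StrRel] at hrel'
          obtain ⟨hq1, hq2, hq3⟩ := hrel'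
          have hiq : i32 (q : Int) = q := i32_nat (Nat.lt_trans hq2 hL)
          rw [parseString_quote_strict hr hpos32 hr1 htn31', hq3]
          simp only [Int.lt_irrefl, if_false, hi]
          have hr2 : Room (tn + 1) (lex true .top (js.drop (q + 1))).1 n := by
            rw [hq3] at hroom'; exact hroom'
          have hle' : pos ≤ q := Nat.le_of_succ_le hq1
          have hb : i32 (q : Int) ≠ -1 := by rw [hiq]; exact natCast_ne_neg_one q
          exact goOn q JSMN_STRING (i32 (i32 ↑pos + 1)) (i32 ↑q) hle' hq2 hb hr1 hr2
      by_cases h6 : isWs c = true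
      · have h6' := h6
        simp only [isWs, Bool.or_eq_true, beq_iff_eq] at h6'
        have hb : body .strictLinks js (fuel + 1) n ⟨⟨pos, tn, sup⟩, some ts, (tn : Int)⟩ c = some (.next ⟨⟨pos, tn, sup⟩, some ts, (tn : Int)⟩) := by
          rcases h6' with ((h | h) | h) | h <;> subst h <;> simp [body]
        have hlex : lex true .top (c :: t) = lex true .top t := by
          rcases h6' with ((h | h) | h) | h <;> subst h <;> simp [lex, isWs]
        rw [hb, hlex]
        rw [hlex] at hroom
        simp only [stepOn, hu]
        exact next1 tn sup ts ns hlen (Nat.le_succ_of_le hle) hroom hrel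
      have h6' : ¬(((c = 0x09 ∨ c = 0x0d) ∨ c = 0x0a) ∨ c = 0x20) := by
        simpa [isWs] using h6
      have hws : isWs c = false := by simpa using h6
      by_cases h7 : c = 0x3a
      · subst h7
        have hi' : i32 ((tn : Int) - 1) = (tn : Int) - 1 := by unfold i32; omega
        have hb : body .strictLinks js (fuel + 1) n ⟨⟨pos, tn, sup⟩, some ts, (tn : Int)⟩ 0x3a =
            some (.next ⟨⟨pos, tn, (tn : Int) - 1⟩, some ts, (tn : Int)⟩) := by simp [body, hi']
        have hlex : lex true .top (0x3a :: t) = push .colon (lex true .top t) := by simp [lex, isWs]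
        have hstep : strictStep ns sup .colon = some (ns, (tn : Int) - 1) := by simp [strictStep, hnl]
        rw [hlex] at hroom
        have hroom' := Room.non rfl hroom
        rw [hb, hlex, strictFrom_push, hstep]
        simp only [stepOn, hu]
        exact next1 tn _ ts ns hlen (Nat.le_succ_of_le hle) hroom' (hrel.setSup _ (by omega))
      by_cases h8 : c = 0x2c
      · subst h8
        obtain ⟨sup', hstep, hcm, hrel'⟩ := comma_strict pos (tn : Int) hrel
        have hb : body .strictLinks js (fuel + 1) n ⟨⟨pos, tn, sup⟩, some ts, (tn : Int)⟩ 0x2c =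
            some (comma .strictLinks ⟨⟨pos, tn, sup⟩, some ts, (tn : Int)⟩) := by simp [body]
        have hlex : lex true .top (0x2c :: t) = push .comma (lex true .top t) := by simp [lex, isWs]
        rw [hlex] at hroom
        have hroom' := Room.non rfl hroom
        rw [hb, hcm, hlex, strictFrom_push, hstep]
        simp only [stepOn, hu]
        exact next1 tn _ ts ns hlen (Nat.le_succ_of_le hle) hroom' hrel'
      -- a primitive, or a byte that may not start one
      have hb : body .strictLinks js (fuel + 1) n ⟨⟨pos, tn, sup⟩, some ts, (tn : Int)⟩ c =
          if primStart c then
            (if (sup != -1 && ((tokAt ts sup).type == JSMN_OBJECT || ((tokAt ts sup).type == JSMN_STRING && (tokAt ts sup).size != 0)))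
              then some (.ret JSMN_ERROR_INVAL ⟨⟨pos, tn, sup⟩, some ts, (tn : Int)⟩)
              else primitiveCase .strictLinks js (fuel + 1) n ⟨⟨pos, tn, sup⟩, some ts, (tn : Int)⟩)
          else some (.ret JSMN_ERROR_INVAL ⟨⟨pos, tn, sup⟩, some ts, (tn : Int)⟩) := by
        simp only [body]
        simp [h1, h2, h3, h4, h5, h6', h7, h8, hst]
      rw [hb]
      by_cases hps : primStart c = true
      · have hnp := primStart_printable hps
        have hlex : lex true .top (c :: t) = push .prim (lex true .prim (js.drop pos)) := by
          rw [hd]; simp [lex, h0, h1, h2, h3, h4, h5, hws, h7, h8, hnp, hps]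
        have hstep : strictStep ns sup .prim =
            if (sup != -1 && ((tokAt ts sup).type == JSMN_OBJECT || ((tokAt ts sup).type == JSMN_STRING && (tokAt ts sup).size != 0)))
            then none else some (countInto ns sup ++ [⟨JSMN_PRIMITIVE, false, sup, false⟩], sup) := by
          rw [forbidden_strict hrel]; rfl
        rw [hlex] at hroom
        obtain ⟨hr1, hroom'⟩ := Room.tok rfl hroom
        rw [hlex, strictFrom_push, hstep, if_pos hps]
        by_cases hforb : (sup != -1 && ((tokAt ts sup).type == JSMN_OBJECT || ((tokAt ts sup).type == JSMN_STRING && (tokAt ts sup).size != 0))) = true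
        · rw [if_pos hforb, if_pos hforb]; rfl
        rw [if_neg hforb, if_neg hforb]
        have hns : primStop .strictLinks c = false := by
          simp [primStop, h8, h3, h4, hst]
          simpa [not_or] using h6'
        obtain ⟨r, hr, hrel'⟩ := primScan_sim .strictLinks js hL (fuel + 1) pos hp hf
        have hip : i32 (pos : Int) = pos := i32_nat (Nat.lt_of_succ_lt hpos31)
        cases r with
        | bad =>
          simp only [PrimRel, hst] at hrel'
          simp only [hrel', strictFrom_inval]
          simp [primitiveCase, parsePrimitive, hr, stepOn, view, JSMN_ERROR_INVAL]
        | eoi q =>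
          simp only [PrimRel, hst] at hrel'
          obtain ⟨_, _, _, hq4, _⟩ := hrel'
          simp only [hq4, if_true, strictFrom_part]
          simp [primitiveCase, parsePrimitive, hr, hst, stepOn, view, JSMN_ERROR_PART]
        | found q =>
          simp only [PrimRel, hst] at hrel'
          obtain ⟨hq1, hq2, hq3, hq4, _⟩ := hrel'
          have hne : q ≠ pos := by intro h; rw [h, hc, hns] at hq3; cases hq3
          obtain ⟨hq0, hup, hiq, hle1, hlt1⟩ := pred_facts (Nat.lt_of_le_of_ne hq1 (Ne.symm hne)) (Nat.le_of_lt hq2) hL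
          have hr2 : Room (tn + 1) (lex true .top (js.drop (q - 1 + 1))).1 n := by
            rw [hq0, ← hq4]; exact hroom'
          have := goOn (q - 1) JSMN_PRIMITIVE (i32 pos) (i32 q) hle1 hlt1 (by rw [hiq]; exact natCast_ne_neg_one q) hr1 hr2
          rw [hq0, ← hq4] at this
          simp only [primitiveCase, parsePrimitive_found_strict hr hr1 htn31', Int.lt_irrefl, if_false, hi, hup]
          exact this
      · have hps' : primStart c = false := by simpa using hps
        have hlex : lex true .top (c :: t) = ([], .inval) := by
          simp [lex, h0, h1, h2, h3, h4, h5, hws, h7, h8, hps']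
        rw [hlex, strictFrom_inval, if_neg hps]
        rfl


/-! ### The theorems -/

/-- **TOKEN MODE OF THE STRICT BUILD (-DJSMN_STRICT -DJSMN_PARENT_LINKS), EXACTLY.** On a text shorter than 2^31 bytes, with an array of `n`
tokens (any content) that has room for the tokens the strict lexer finds, `jsmn_init; jsmn_parse` answers
`strictResult (lex true .top js)`: -2 at the first item the machine `strictStep` refuses (S1, S2, S3, a closing bracket that does not
fit); else -2 / -3 if the lexer ends with `inval` / `part`; else -3 if a token is still open; else the number of tokens. -/
theorem token_mode_strict (js : List UInt8) (ts : Tokens) (n : Nat) (hL : js.length < 2147483648) (hts : ts.length = n)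
    (hroom : tokCount (lex true .top js).1 ≤ n) :
    ∃ ts', run .strictLinks js (some ts) n = some (strictResult (lex true .top js), some ts') := by
  have hrel : Rel ts 0 (-1) [] :=
    ⟨rfl, fun i hi => absurd hi (Nat.not_lt_zero i), by omega, fun i hi => absurd hi (Nat.not_lt_zero i), fun i hi => absurd hi (Nat.not_lt_zero i)⟩
  have h := loop_strict js n hL (js.length + 1) 0 0 (-1) ts [] (Nat.zero_le _) (by omega) hts (Nat.le_refl 0)
    (by simpa [Room] using hroom) hrel
  simp only [List.drop_zero, view] at h
  have h32 : i32 ((0 : Nat) : Int) = ((0 : Nat) : Int) := by decide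
  cases hl : loop .strictLinks js n (js.length + 1) ⟨⟨0, 0, -1⟩, some ts, ((0 : Nat) : Int)⟩ with
  | none => rw [hl] at h; cases h
  | some x =>
    rw [hl] at h
    simp only [Option.map_some, Option.some.injEq, Prod.mk.injEq] at h
    obtain ⟨h1, h2⟩ := h
    cases hx : x.2.toks with
    | none => rw [hx] at h2; cases h2
    | some ts' =>
      refine ⟨ts', ?_⟩
      simp only [run, parse, parseFuel, Parser.init, h32, hl, Option.map_some, hx, h1, strictResult]

/-- Room for as many tokens as the text has bytes is always enough. -/
theorem token_mode_strict_len (js : List UInt8) (ts : Tokens) (n : Nat) (hL : js.length < 2147483648) (hts : ts.length = n)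
    (hn : js.length ≤ n) : ∃ ts', run .strictLinks js (some ts) n = some (strictResult (lex true .top js), some ts') :=
  token_mode_strict js ts n hL hts (Nat.le_trans (tokCount_lex_le true js .top) hn)

theorem closeWalk_length {type : Nat} {ns ns' : List Node} {sup sup' : Int} : ∀ (fuel : Nat) (idx : Int),
    closeWalk type ns sup fuel idx = some (ns', sup') → ns'.length = ns.length := by
  intro fuel
  induction fuel with
  | zero => intro idx h; simp [closeWalk] at h
  | succ fuel ih =>
    intro idx h
    rw [closeWalk] at h
    split at h
    · split at h
      · cases h
      · simp only [Option.some.injEq, Prod.mk.injEq] at h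
        rw [← h.1, length_nodeUpd]
    · split at h
      · split at h
        · cases h
        · simp only [Option.some.injEq, Prod.mk.injEq] at h
          rw [← h.1]
      · exact ih _ h

/-- Every step of the machine that is not refused adds one node per token item. -/
theorem strictStep_length {ns ns' : List Node} {sup sup' : Int} {i : Item} (h : strictStep ns sup i = some (ns', sup')) :
    ns'.length = ns.length + if i.isToken then 1 else 0 := by
  have hopen : ∀ (b : Bool) (x : Node), (if b = true then none else some (countInto ns sup ++ [x], sup')) = some (ns', sup') →
      ns'.length = ns.length + 1 := by
    intro b x h
    split at h
    · cases h
    · simp only [Option.some.injEq, Prod.mk.injEq] at h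
      rw [← h.1]; simp [length_countInto]
  have hclose : ∀ type, (if ns.length < 1 then none else closeWalk type ns sup (ns.length + 1) ((ns.length : Int) - 1)) = some (ns', sup') →
      ns'.length = ns.length + 0 := by
    intro type h
    split at h
    · cases h
    · exact closeWalk_length _ _ h
  cases i with
  | objOpen =>
    simp only [strictStep] at h
    split at h
    · cases h
    · simp only [Option.some.injEq, Prod.mk.injEq] at h
      rw [← h.1]; simp [length_countInto, Item.isToken]
  | arrOpen =>
    simp only [strictStep] at h
    split at h
    · cases h
    · simp only [Option.some.injEq, Prod.mk.injEq] at h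
      rw [← h.1]; simp [length_countInto, Item.isToken]
  | objClose => exact hclose _ h
  | arrClose => exact hclose _ h
  | colon =>
    simp only [strictStep, Option.some.injEq, Prod.mk.injEq] at h
    rw [← h.1]; rfl
  | comma =>
    simp only [strictStep] at h
    split at h <;> simp only [Option.some.injEq, Prod.mk.injEq] at h <;> rw [← h.1] <;> rfl
  | str =>
    simp only [strictStep, Option.some.injEq, Prod.mk.injEq] at h
    rw [← h.1]; simp [length_countInto, Item.isToken]
  | prim =>
    simp only [strictStep] at h
    split at h
    · cases h
    · simp only [Option.some.injEq, Prod.mk.injEq] at h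
      rw [← h.1]; simp [length_countInto, Item.isToken]

theorem strictRun_length : ∀ (items : List Item) {ns ns' : List Node} {sup sup' : Int},
    strictRun ns sup items = some (ns', sup') → ns'.length = ns.length + tokCount items := by
  intro items
  induction items with
  | nil => intro ns ns' sup sup' h; simp [strictRun] at h; simp [h.1, tokCount]
  | cons i is ih =>
    intro ns ns' sup sup' h
    rw [strictRun] at h
    cases hs : strictStep ns sup i with
    | none => rw [hs] at h; cases h
    | some x =>
      obtain ⟨ns1, sup1⟩ := x
      rw [hs] at h
      have h1 := strictStep_length hs
      have h2 := ih h
      rw [h2, h1]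
      simp only [tokCount, List.filter_cons]
      split <;> simp <;> omega

/-- **THE LANGUAGE THE STRICT BUILD ACCEPTS** (token mode, enough tokens): the texts on which the strict lexer reaches the end, the machine
refuses no item, and no token is left open. The answer is then the number of tokens. -/
theorem strictResult_nonneg (r : List Item × Ending) :
    0 ≤ strictResult r ↔ r.2 = .eof ∧ ∃ ns sup, strictRun [] (-1) r.1 = some (ns, sup) ∧ ns.any (·.isOpen) = false := by
  simp only [strictResult, strictFrom]
  cases hb : strictRun [] (-1) r.1 with
  | none => simp [JSMN_ERROR_INVAL]
  | some x =>
    obtain ⟨ns, sup⟩ := x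
    cases he : r.2
    · simp only []
      constructor
      · intro h
        refine ⟨trivial, ns, sup, rfl, ?_⟩
        cases ha : ns.any (·.isOpen)
        · rfl
        · rw [ha] at h; simp [JSMN_ERROR_PART] at h
      · rintro ⟨_, ns', sup', heq, ha⟩
        simp only [Option.some.injEq, Prod.mk.injEq] at heq
        rw [heq.1, ha]
        simp
    · simp [JSMN_ERROR_INVAL]
    · simp [JSMN_ERROR_PART]

theorem strictResult_value (r : List Item × Ending) (h : 0 ≤ strictResult r) : strictResult r = tokCount r.1 := by
  obtain ⟨he, ns, sup, hr, ha⟩ := (strictResult_nonneg r).mp h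
  have hl := strictRun_length r.1 hr
  simp only [strictResult, strictFrom, hr, he, ha]
  simp [hl]

theorem token_mode_strict_accepts (js : List UInt8) (ts : Tokens) (n : Nat) (hL : js.length < 2147483648) (hts : ts.length = n)
    (hroom : tokCount (lex true .top js).1 ≤ n) :
    (∃ r ts', 0 ≤ r ∧ run .strictLinks js (some ts) n = some (r, some ts')) ↔
      (lex true .top js).2 = .eof ∧
        ∃ ns sup, strictRun [] (-1) (lex true .top js).1 = some (ns, sup) ∧ ns.any (·.isOpen) = false := by
  obtain ⟨ts', h⟩ := token_mode_strict js ts n hL hts hroom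
  rw [← strictResult_nonneg]
  constructor
  · rintro ⟨r, ts'', hr, h'⟩
    rw [h] at h'
    simp only [Option.some.injEq, Prod.mk.injEq] at h'
    rw [h'.1]; exact hr
  · intro hr
    exact ⟨_, ts', hr, h⟩

/-- Whatever the token mode of the strict build accepts, its counting mode accepts too, with the same count. -/
theorem count_of_token_mode_strict (js : List UInt8) (h : 0 ≤ strictResult (lex true .top js)) :
    countResult (lex true .top js) = strictResult (lex true .top js) := by
  rw [strictResult_value _ h]
  have h' := (strictResult_nonneg _).mp h
  simp [countResult, h'.1]

end Jsmn.AcceptLang
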